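-- pv_equiv track=rewrite | github.com/Ricky-025/Password-generator- | password.py | generate_password
-- ===== SOURCE A (Python) =====
-- def generate_password(length):
--     chars = "abcdefghijklmnopqrstuvwxyzABCDEFGHIJKLMNOPQRSTUVWXYZ0123456789!@#$%^&*?"
--
--     password = ""
--     index_seed = 0
--
--     for i in range(length):
--         index_seed = (index_seed + (i * 7 + length * 3)) % len(chars)
--         password += chars[index_seed]
--
--     return password
-- ===== SOURCE B (Python) =====
-- def generate_password(length):
--     chars = "abcdefghijklmnopqrstuvwxyzABCDEFGHIJKLMNOPQRSTUVWXYZ0123456789!@#$%^&*?"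
--     n = len(chars)
--     return "".join(
--         chars[(7 * (i * (i + 1) // 2) + 3 * length * (i + 1)) % n]
--         for i in range(length)
--     )
-- ===== Notes on version B (the rewrite author's own statement) =====
-- stated objective: alternative
-- what changed: Replaces the carried running-seed accumulator with a stateless closed-form index per position (the triangular-number prefix sum of the step increments, reduced mod the pool size) and builds the string with join over a comprehension instead of repeated concatenation.
import Mathlib
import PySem

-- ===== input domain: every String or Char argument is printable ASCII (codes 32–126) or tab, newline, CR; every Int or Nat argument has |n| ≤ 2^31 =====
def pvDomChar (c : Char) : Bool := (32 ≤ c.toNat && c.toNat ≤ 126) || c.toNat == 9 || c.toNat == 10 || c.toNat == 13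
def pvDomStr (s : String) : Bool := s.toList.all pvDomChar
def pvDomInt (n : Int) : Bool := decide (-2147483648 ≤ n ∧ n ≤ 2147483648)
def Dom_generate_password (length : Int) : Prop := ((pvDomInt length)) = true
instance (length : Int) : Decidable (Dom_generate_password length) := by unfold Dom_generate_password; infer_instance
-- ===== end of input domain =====

-- B replaces A's carried running-seed accumulator by a stateless closed-form index per
-- position (alternative decomposition, same cost); equivalence proved for every Int length.

-- the character pool (shared string literal of both Pythons), as a char list
def pwChars : List Char := "abcdefghijklmnopqrstuvwxyzABCDEFGHIJKLMNOPQRSTUVWXYZ0123456789!@#$%^&*?".toList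

-- ===== PORT A =====
-- literal port: string built as a List Char (String.mk at the end); chars[index_seed] is
-- pyGetD with a dummy default since index_seed = … % len(chars) is always in range
def generate_password (length : Int) : String :=
  let chars := pwChars
  String.mk
    (((PySem.List.pyRange 0 length 1).foldl
      (fun (st : Int × List Char) i =>
        let seed := PySem.Int.mod (st.1 + (i * 7 + length * 3)) (chars.length : Int)
        (seed, st.2 ++ [PySem.List.pyGetD chars seed ' ']))
      (0, [])).2)

-- ===== PORT B =====
def generate_password_alt (length : Int) : String :=
  let chars := pwChars
  String.mk
    ((PySem.List.pyRange 0 length 1).map (fun i =>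
      PySem.List.pyGetD chars
        (PySem.Int.mod (7 * PySem.Int.floordiv (i * (i + 1)) 2 + 3 * length * (i + 1))
          (chars.length : Int)) ' '))

-- ===== PRECONDITION & SPEC =====
def Spec_generate_password (length : Int) (out : String) : Prop := out = generate_password_alt length
instance (length : Int) (out : String) : Decidable (Spec_generate_password length out) := by unfold Spec_generate_password; infer_instance

-- ===== CLAIM (what is proved, stated in full; the proofs are below) =====
def Claim_equal_generate_password : Prop := ∀ (length : Int), Dom_generate_password length → Spec_generate_password length (generate_password length)

-- ===== LEMMAS AND PROOFS =====

-- B's closed-form index at position i (with len(chars) = 71 evaluated)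
def pvSeed (L : Int) (i : Int) : Int :=
  PySem.Int.mod (7 * PySem.Int.floordiv (i * (i + 1)) 2 + 3 * L * (i + 1)) 71

-- A's running seed before iteration n
def pvSeedN (L : Int) : Nat → Int
  | 0 => 0
  | n + 1 => pvSeed L (n : Int)

lemma pwChars_len : ((pwChars.length : Nat) : Int) = 71 := by decide

-- one step of A's recurrence lands on the closed form
lemma pvSeed_step (L : Int) (n : Nat) :
    PySem.Int.mod (pvSeedN L n + ((n : Int) * 7 + L * 3)) 71 = pvSeed L (n : Int) := by
  cases n with
  | zero =>
      have h0 : PySem.Int.floordiv ((0 : Int) * (0 + 1)) 2 = 0 := by decide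
      unfold pvSeedN pvSeed
      norm_num [h0]
      congr 1
      ring
  | succ m =>
      simp only [pvSeedN, pvSeed]
      rw [PySem.Int.mod_eq_emod_of_pos (by norm_num),
          PySem.Int.mod_eq_emod_of_pos (by norm_num),
          PySem.Int.mod_eq_emod_of_pos (by norm_num),
          PySem.Int.floordiv_eq_ediv_of_pos (by norm_num),
          PySem.Int.floordiv_eq_ediv_of_pos (by norm_num)]
      push_cast
      set a : Int := (m : Int) with ha
      obtain ⟨t, ht⟩ := Int.even_mul_succ_self a
      have h2t : a * (a + 1) = 2 * t := by omega
      have hd1 : a * (a + 1) / 2 = t := by omega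
      have hd2 : (a + 1) * ((a + 1) + 1) / 2 = t + a + 1 := by
        have : (a + 1) * ((a + 1) + 1) = 2 * (t + a + 1) := by nlinarith [h2t]
        omega
      rw [hd1, hd2]
      have hX : 7 * (t + a + 1) + 3 * L * (a + 1 + 1)
          = (7 * t + 3 * L * (a + 1)) + ((a + 1) * 7 + L * 3) := by ring
      rw [hX]
      omega

-- the loop invariant: A's foldl over range n produces the closed-form prefix
lemma pv_loop (L : Int) (n : Nat) :
    (((List.range n).map (fun (k : Nat) => (0 : Int) + (k : Int))).foldl
      (fun (st : Int × List Char) i =>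
        (PySem.Int.mod (st.1 + (i * 7 + L * 3)) ((pwChars.length : Nat) : Int),
         st.2 ++ [PySem.List.pyGetD pwChars
           (PySem.Int.mod (st.1 + (i * 7 + L * 3)) ((pwChars.length : Nat) : Int)) ' ']))
      (0, []))
    = (pvSeedN L n,
       (List.range n).map (fun (k : Nat) =>
         PySem.List.pyGetD pwChars (pvSeed L ((0 : Int) + (k : Int))) ' ')) := by
  induction n with
  | zero => simp [pvSeedN]
  | succ m ih =>
      rw [List.range_succ, List.map_append, List.foldl_append, ih,
          List.map_append]
      simp only [List.map_cons, List.map_nil, List.foldl_cons, List.foldl_nil]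
      have hseed : PySem.Int.mod (pvSeedN L m + (((0 : Int) + (m : Int)) * 7 + L * 3))
          ((pwChars.length : Nat) : Int) = pvSeed L ((0 : Int) + (m : Int)) := by
        rw [pwChars_len, zero_add]
        exact pvSeed_step L m
      rw [hseed]
      simp [pvSeedN]

-- ===== VERDICT (by name: the statement is the Claim_ definition above) =====
theorem generate_password_spec : Claim_equal_generate_password := by
  intro L _
  show generate_password L = generate_password_alt L
  unfold generate_password generate_password_alt
  rw [PySem.List.pyRange_one]
  simp only [Int.sub_zero]
  rw [pv_loop L L.toNat, List.map_map]
  dsimp only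
  apply congrArg
  apply List.map_congr_left
  intro k _
  simp [Function.comp, pvSeed, pwChars_len]
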